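-- pv_equiv track=rewrite | github.com/zombie1864/python_DSnA | src/_01A_basic.py | list_of_records
-- ===== SOURCE A (Python) =====
-- from typing import List, Tuple, Dict
--
-- def list_of_records(rows: List[List[int]], colnames: Tuple[str]) -> List[Dict[str, int]]: # _9 [✅]
--     """Given list of list of integers and a tuple of colnames, return a list of dictionaries, where
--     each value is associated with a given colname.
--
--     ex.
--     Given:
--         rows = [[1,2,3], [4,5,6], [7,8,9]]
--         colnames = ('a', 'b', 'c')
--
--     Returns:
--         [
--             {'a': 1, 'b': 2, 'c': 3},
--             {'a': 4, 'b': 5, 'c': 6},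
--             {'a': 7, 'b': 8, 'c': 9},
--         ]
--
--     Args:
--         rows (List[List[int]]): The row values
--         colnames (Tuple[str]): The colnames
--
--     Raises:
--         ValueError: If rows are of unequal length
--         ValueError: If column names are not equal to the length of each row
--
--     Returns:
--         List[Dict[str, int]]: [description]
--     """
--     if any( True for sub_rows in rows if len(sub_rows) != len(colnames) ): raise ValueError
--     dictionary = dict()
--     list_of_dict = list()
--     for i in range(len(rows)):
--         for j in range(len(colnames)):
--             dictionary[colnames[j]] = rows[i][j]
--         list_of_dict.append(dictionary)
--         dictionary = dict()
--     return list_of_dict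
-- ===== SOURCE B (Python) =====
-- def list_of_records(rows, colnames):
--     if any(len(row) != len(colnames) for row in rows):
--         raise ValueError
--     records = [{} for _ in rows]
--     for j, name in enumerate(colnames):
--         for rec, row in zip(records, rows):
--             rec[name] = row[j]
--     return records
-- ===== Notes on version B (the rewrite author's own statement) =====
-- stated objective: alternative
-- what changed: B fills the records column-by-column (outer loop over colnames, inner zip over pre-created empty dicts, one per row) instead of A's row-major nested index loops, so the traversal order is transposed; same asymptotic cost.
import Mathlib
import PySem

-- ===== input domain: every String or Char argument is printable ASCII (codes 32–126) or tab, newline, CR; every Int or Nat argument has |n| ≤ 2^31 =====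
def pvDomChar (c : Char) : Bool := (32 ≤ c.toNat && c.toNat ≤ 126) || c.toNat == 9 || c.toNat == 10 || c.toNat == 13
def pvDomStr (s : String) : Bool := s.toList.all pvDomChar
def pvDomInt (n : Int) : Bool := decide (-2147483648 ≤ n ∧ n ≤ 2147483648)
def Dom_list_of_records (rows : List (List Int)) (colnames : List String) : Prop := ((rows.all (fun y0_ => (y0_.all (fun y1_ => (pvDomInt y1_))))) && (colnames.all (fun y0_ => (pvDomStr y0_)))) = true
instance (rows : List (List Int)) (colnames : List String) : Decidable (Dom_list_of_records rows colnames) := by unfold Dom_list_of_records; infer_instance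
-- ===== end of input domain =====

-- B fills the records column-by-column instead of A's row-major nested index loops; objective: alternative (same cost, transposed traversal).

-- ===== PORT A =====
-- A: validate all row lengths (raise excluded via Pre_), then nested index loops building each dict row-major.
def list_of_records (rows : List (List Int)) (colnames : List String) : List (List (String × Int)) :=
  (PySem.List.pyRange 0 (rows.length : Int) 1).foldl
    (fun (acc : List (List (String × Int))) i =>
      acc ++ [((PySem.List.pyRange 0 (colnames.length : Int) 1).foldl
        (fun (d : PySem.Dict String Int) j =>
          d.insert (PySem.List.pyGetD colnames j "")
                   (PySem.List.pyGetD (PySem.List.pyGetD rows i []) j 0))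
        PySem.Dict.empty).items]) []

-- ===== PORT B =====
-- B: pre-create one empty dict per row, then loop over enumerate(colnames) and, per column,
-- assign rec[name] = row[j] across zip(records, rows); the raise branch is excluded via Pre_.
def list_of_records_alt (rows : List (List Int)) (colnames : List String) : List (List (String × Int)) :=
  ((PySem.List.enumerate colnames 0).foldl
    (fun (records : List (PySem.Dict String Int)) (p : Int × String) =>
      (records.zip rows).map (fun q => q.1.insert p.2 (PySem.List.pyGetD q.2 p.1 0)))
    (rows.map (fun _ => PySem.Dict.empty))).map PySem.Dict.items

-- ===== PRECONDITION & SPEC =====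
-- A raises ValueError exactly when some row's length differs from len(colnames); those inputs are excluded.
def Pre_list_of_records (rows : List (List Int)) (colnames : List String) : Prop :=
  ∀ row ∈ rows, row.length = colnames.length
instance (rows : List (List Int)) (colnames : List String) : Decidable (Pre_list_of_records rows colnames) := by unfold Pre_list_of_records; infer_instance
def pvWitness_list_of_records : List (List Int) × List String := ([[1, 2], [3, 4]], ["a", "b"])

def Spec_list_of_records (rows : List (List Int)) (colnames : List String) (out : List (List (String × Int))) : Prop := out = list_of_records_alt rows colnames
instance (rows : List (List Int)) (colnames : List String) (out : List (List (String × Int))) : Decidable (Spec_list_of_records rows colnames out) := by unfold Spec_list_of_records; infer_instance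

-- ===== CLAIM (what is proved, stated in full; the proofs are below) =====
def Claim_equal_list_of_records : Prop := ∀ (rows : List (List Int)) (colnames : List String), Dom_list_of_records rows colnames → Pre_list_of_records rows colnames → Spec_list_of_records rows colnames (list_of_records rows colnames)

-- ===== LEMMAS AND PROOFS =====

-- A's inner index loop over colnames builds exactly the dict of the (colname, value) zip when the lengths agree.
theorem inner_loop_eq_ofList (colnames : List String) (row : List Int)
    (h : row.length = colnames.length) :
    (PySem.List.pyRange 0 (colnames.length : Int) 1).foldl
      (fun (d : PySem.Dict String Int) j =>
        d.insert (PySem.List.pyGetD colnames j "") (PySem.List.pyGetD row j 0))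
      PySem.Dict.empty
      = PySem.Dict.ofList (colnames.zip row) := by
  have hlen : (colnames.zip row).length = colnames.length := by
    simp [List.length_zip, h]
  rw [show (colnames.length : Int) = ((colnames.zip row).length : Int) by rw [hlen]]
  have hcongr : ∀ (d : PySem.Dict String Int),
      ∀ j ∈ PySem.List.pyRange 0 ((colnames.zip row).length : Int) 1,
      d.insert (PySem.List.pyGetD colnames j "") (PySem.List.pyGetD row j 0)
        = (fun (d : PySem.Dict String Int) (p : String × Int) => d.insert p.1 p.2) d
            (PySem.List.pyGetD (colnames.zip row) j ("", 0)) := by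
    intro d j hj
    rw [PySem.List.mem_pyRange_one] at hj
    obtain ⟨hj0, hjn⟩ := hj
    rw [PySem.List.pyGetD_eq_getElem _ ("", 0) hj0 (by exact_mod_cast hjn),
        PySem.List.pyGetD_eq_getElem _ "" hj0 (by exact_mod_cast (by omega : j < ((colnames.length : Int)))),
        PySem.List.pyGetD_eq_getElem _ 0 hj0 (by exact_mod_cast (by rw [hlen] at hjn; omega : j < ((row.length : Int))))]
    simp [List.getElem_zip]
  calc (PySem.List.pyRange 0 ((colnames.zip row).length : Int) 1).foldl
        (fun (d : PySem.Dict String Int) j =>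
          d.insert (PySem.List.pyGetD colnames j "") (PySem.List.pyGetD row j 0))
        PySem.Dict.empty
      = (PySem.List.pyRange 0 ((colnames.zip row).length : Int) 1).foldl
          (fun (d : PySem.Dict String Int) j =>
            (fun (d : PySem.Dict String Int) (p : String × Int) => d.insert p.1 p.2) d
              (PySem.List.pyGetD (colnames.zip row) j ("", 0)))
          PySem.Dict.empty := PySem.List.foldl_congr_mem _ _ _ _ hcongr
    _ = (colnames.zip row).foldl
          (fun (d : PySem.Dict String Int) (p : String × Int) => d.insert p.1 p.2)
          PySem.Dict.empty :=
        PySem.List.foldl_pyRange_zero_pyGetD' (colnames.zip row) ("", 0) (fun (d : PySem.Dict String Int) (p : String × Int) => d.insert p.1 p.2) PySem.Dict.empty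
    _ = PySem.Dict.ofList (colnames.zip row) := by
        simp [PySem.Dict.ofList, PySem.Dict.update]

-- one column step across zip(records, rows) acts row-wise when records = rows.map h
theorem zip_map_step (rows : List (List Int)) (h : List Int → PySem.Dict String Int)
    (p : Int × String) :
    ((rows.map h).zip rows).map (fun q => q.1.insert p.2 (PySem.List.pyGetD q.2 p.1 0))
      = rows.map (fun row => (h row).insert p.2 (PySem.List.pyGetD row p.1 0)) := by
  induction rows with
  | nil => simp
  | cons r rs ih => simp [ih]

-- loop interchange: B's column-major fold equals a row-wise per-record fold
theorem colfold_eq_map (xs : List (Int × String)) (rows : List (List Int))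
    (h : List Int → PySem.Dict String Int) :
    xs.foldl
      (fun (records : List (PySem.Dict String Int)) (p : Int × String) =>
        (records.zip rows).map (fun q => q.1.insert p.2 (PySem.List.pyGetD q.2 p.1 0)))
      (rows.map h)
      = rows.map (fun row =>
          xs.foldl (fun (d : PySem.Dict String Int) (p : Int × String) =>
            d.insert p.2 (PySem.List.pyGetD row p.1 0)) (h row)) := by
  induction xs generalizing h with
  | nil => rfl
  | cons p ps ih =>
      simp only [List.foldl_cons]
      rw [zip_map_step rows h p, ih (fun row => (h row).insert p.2 (PySem.List.pyGetD row p.1 0))]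

-- B's per-row fold over enumerate(colnames) equals A's inner index loop shape, hence the zip dict
theorem rowfold_eq_ofList (colnames : List String) (row : List Int)
    (h : row.length = colnames.length) :
    (PySem.List.enumerate colnames 0).foldl
      (fun (d : PySem.Dict String Int) (p : Int × String) =>
        d.insert p.2 (PySem.List.pyGetD row p.1 0)) PySem.Dict.empty
      = PySem.Dict.ofList (colnames.zip row) := by
  rw [PySem.List.enumerate_eq_map_pyRange colnames "", List.foldl_map]
  exact inner_loop_eq_ofList colnames row h

-- ===== VERDICT (by name: the statement is the Claim_ definition above) =====
theorem list_of_records_spec : Claim_equal_list_of_records := by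
  intro rows colnames _ hpre
  unfold Spec_list_of_records list_of_records list_of_records_alt
  rw [colfold_eq_map, List.map_map,
      PySem.List.foldl_pyRange_zero_pyGetD' rows []
      (fun (acc : List (List (String × Int))) row =>
        acc ++ [((PySem.List.pyRange 0 (colnames.length : Int) 1).foldl
          (fun (d : PySem.Dict String Int) j =>
            d.insert (PySem.List.pyGetD colnames j "") (PySem.List.pyGetD row j 0))
          PySem.Dict.empty).items]) [],
      PySem.List.foldl_append_singleton_eq_map]
  apply List.map_congr_left
  intro row hrow
  rw [inner_loop_eq_ofList colnames row (hpre row hrow),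
      Function.comp_apply, rowfold_eq_ofList colnames row (hpre row hrow)]
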